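-- pv_equiv track=rewrite | github.com/ry413/Aethorac2 | rs485_oracle.py | build_chunked_commands
-- ===== SOURCE A (Python) =====
-- def build_chunked_commands(base_type, data_str):
--     packets = []
--     chunk_size = 3
--     for i in range(0, len(data_str), chunk_size):
--         chunk = [ord(c) for c in data_str[i : i + chunk_size]]
--         while len(chunk) < 3:
--             chunk.append(0xFF)
--         type_ = base_type + (i // chunk_size)
--         pkt = [0x7F, 0x79, type_] + chunk
--         checksum = sum(pkt) & 0xFF
--         pkt += [checksum, 0x7E]
--         packets.append(pkt)
--     if len(data_str) % 3 == 0: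
--         type_ = base_type + (len(data_str) // 3)
--         pkt = [0x7F, 0x79, type_, 0xFF, 0xFF, 0xFF]
--         checksum = sum(pkt) & 0xFF
--         pkt += [checksum, 0x7E]
--         packets.append(pkt)
--     return packets
-- ===== SOURCE B (Python) =====
-- def build_chunked_commands(base_type, data_str):
--     # Pad the whole byte sequence once up to the next multiple of 3
--     # (a full 0xFF chunk when the length is already a multiple of 3).
--     body = [ord(c) for c in data_str] + [0xFF] * (3 - len(data_str) % 3)
--     # Pass 1: group the padded bytes into consecutive triples.
--     chunks = []
--     cur = []
--     for x in body:
--         cur.append(x)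
--         if len(cur) == 3:
--             chunks.append(cur)
--             cur = []
--     # Pass 2: frame each triple.
--     packets = []
--     for k, chunk in enumerate(chunks):
--         pkt = [0x7F, 0x79, base_type + k] + chunk
--         pkt += [sum(pkt) & 0xFF, 0x7E]
--         packets.append(pkt)
--     return packets
-- ===== Notes on version B (the rewrite author's own statement) =====
-- stated objective: alternative
-- what changed: Instead of A's single index loop with a per-chunk while-loop for padding plus a separate trailing-packet branch, B pads the whole byte sequence once (3 - n%3 bytes of 0xFF, a full 0xFF chunk when n%3 == 0, so no tail case exists), groups the padded bytes into triples in one accumulator pass, and frames the triples in a second enumerate pass.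
import Mathlib
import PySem

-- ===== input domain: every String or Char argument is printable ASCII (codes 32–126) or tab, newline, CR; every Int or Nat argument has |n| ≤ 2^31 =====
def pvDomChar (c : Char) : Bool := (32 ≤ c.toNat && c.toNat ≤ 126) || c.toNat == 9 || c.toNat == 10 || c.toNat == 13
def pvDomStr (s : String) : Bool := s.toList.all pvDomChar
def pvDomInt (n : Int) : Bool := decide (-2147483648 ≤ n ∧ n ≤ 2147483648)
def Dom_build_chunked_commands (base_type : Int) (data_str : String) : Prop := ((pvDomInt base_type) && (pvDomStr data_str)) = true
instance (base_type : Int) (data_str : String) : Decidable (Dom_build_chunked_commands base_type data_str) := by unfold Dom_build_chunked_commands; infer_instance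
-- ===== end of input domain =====

-- B pads the whole byte sequence once (3 - n%3 bytes of 0xFF, a full 0xFF chunk when
-- n%3 == 0) and consumes the padded list three bytes at a time, so A's per-chunk
-- padding loop and separate trailing-packet branch disappear (objective: alternative).

-- ===== PORT A =====
-- the 'while len(chunk) < 3: chunk.append(0xFF)' loop of A
def padFF (chunk : List Int) : List Int :=
  if chunk.length < 3 then padFF (chunk ++ [0xFF]) else chunk
termination_by 3 - chunk.length
decreasing_by simp_all; omega

def build_chunked_commands (base_type : Int) (data_str : String) : List (List Int) :=
  let chunk_size : Int := 3
  let packets := (PySem.List.pyRange 0 (PySem.Str.len data_str) chunk_size).foldl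
    (fun packets i =>
      let chunk := (PySem.List.slice data_str.toList (some i) (some (i + chunk_size))).map
        (fun c => (c.toNat : Int))
      let chunk := padFF chunk
      let type_ := base_type + PySem.Int.floordiv i chunk_size
      let pkt := [0x7F, 0x79, type_] ++ chunk
      let checksum := PySem.Int.band pkt.sum 0xFF
      packets ++ [pkt ++ [checksum, 0x7E]]) []
  if PySem.Int.mod (PySem.Str.len data_str) 3 = 0 then
    let type_ := base_type + PySem.Int.floordiv (PySem.Str.len data_str) 3
    let pkt : List Int := [0x7F, 0x79, type_, 0xFF, 0xFF, 0xFF]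
    let checksum := PySem.Int.band pkt.sum 0xFF
    packets ++ [pkt ++ [checksum, 0x7E]]
  else packets

-- ===== PORT B =====
-- body of Source B's grouping for-loop: append x to cur, close the triple at length 3
def gstep (st : List (List Int) × List Int) (x : Int) : List (List Int) × List Int :=
  let cur := st.2 ++ [x]
  if cur.length = 3 then (st.1 ++ [cur], []) else (st.1, cur)

def build_chunked_commands_alt (base_type : Int) (data_str : String) : List (List Int) :=
  -- [0xFF] * (3 - len(data_str) % 3): the count 3 - n%3 is in {1,2,3}, so .toNat is exact
  let body := data_str.toList.map (fun c => (c.toNat : Int)) ++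
    List.replicate (3 - PySem.Int.mod (PySem.Str.len data_str) 3).toNat (0xFF : Int)
  let grouped := body.foldl gstep ([], [])
  let chunks := grouped.1
  (PySem.List.enumerate chunks 0).foldl
    (fun packets kc =>
      let pkt := [0x7F, 0x79, base_type + kc.1] ++ kc.2
      packets ++ [pkt ++ [PySem.Int.band pkt.sum 0xFF, 0x7E]]) []

-- ===== PRECONDITION & SPEC =====
def Spec_build_chunked_commands (base_type : Int) (data_str : String) (out : List (List Int)) : Prop := out = build_chunked_commands_alt base_type data_str
instance (base_type : Int) (data_str : String) (out : List (List Int)) : Decidable (Spec_build_chunked_commands base_type data_str out) := by unfold Spec_build_chunked_commands; infer_instance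

-- ===== CLAIM (what is proved, stated in full; the proofs are below) =====
def Claim_equal_build_chunked_commands : Prop := ∀ (base_type : Int) (data_str : String), Dom_build_chunked_commands base_type data_str → Spec_build_chunked_commands base_type data_str (build_chunked_commands base_type data_str)

-- ===== LEMMAS AND PROOFS =====

-- proof-only intermediate: consume the padded byte list three bytes at a time
def chunkLoop (packets : List (List Int)) (t : Int) (body : List Int) : List (List Int) :=
  if h : body = [] then packets
  else
    let pkt := [0x7F, 0x79, t] ++ body.take 3
    let pkt := pkt ++ [PySem.Int.band pkt.sum 0xFF, 0x7E]
    chunkLoop (packets ++ [pkt]) (t + 1) (body.drop 3)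
termination_by body.length
decreasing_by
  cases body with
  | nil => exact absurd rfl h
  | cons a l => simp

-- proof-only intermediate: the list of consecutive triples of the padded byte list
def chunkList (body : List Int) : List (List Int) :=
  if h : body = [] then []
  else body.take 3 :: chunkList (body.drop 3)
termination_by body.length
decreasing_by
  cases body with
  | nil => exact absurd rfl h
  | cons a l => simp

-- the frame both programs build around a 3-byte chunk
def mkPkt (t : Int) (chunk : List Int) : List Int :=
  let pkt := [0x7F, 0x79, t] ++ chunk
  pkt ++ [PySem.Int.band pkt.sum 0xFF, 0x7E]

-- A's padding while-loop is exactly padding with replicate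
theorem padFF_eq (chunk : List Int) :
    padFF chunk = chunk ++ List.replicate (3 - chunk.length) 0xFF := by
  fun_induction padFF chunk with
  | case1 c h ih =>
      have hl : 3 - c.length = (3 - (c ++ [(0xFF : Int)]).length) + 1 := by
        simp; omega
      rw [ih, List.append_assoc, hl, List.replicate_succ]
      simp
  | case2 c h =>
      have : 3 - c.length = 0 := by omega
      simp [this]

-- chunkLoop, one step at a time, in terms of mkPkt
theorem chunkLoop_eq (packets : List (List Int)) (t : Int) (body : List Int) :
    chunkLoop packets t body =
      if body = [] then packets
      else chunkLoop (packets ++ [mkPkt t (body.take 3)]) (t + 1) (body.drop 3) := by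
  rw [chunkLoop]
  split_ifs with h
  · rfl
  · rfl

-- B's accumulator is a prefix
theorem chunkLoop_acc : ∀ (n : Nat) (body : List Int), body.length = n →
    ∀ (packets : List (List Int)) (t : Int),
    chunkLoop packets t body = packets ++ chunkLoop [] t body := by
  intro n
  induction n using Nat.strong_induction_on with
  | _ n ih =>
    intro body hlen packets t
    rw [chunkLoop_eq, chunkLoop_eq [] t body]
    by_cases h : body = []
    · simp [h]
    · rw [if_neg h, if_neg h]
      have hd : (body.drop 3).length < n := by
        subst hlen
        cases body with
        | nil => exact absurd rfl h
        | cons a l => simp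
      have hrec : ∀ (packets : List (List Int)) (t : Int),
          chunkLoop packets t (body.drop 3) = packets ++ chunkLoop [] t (body.drop 3) :=
        ih _ hd _ rfl
      simp only [List.nil_append]
      rw [hrec (packets ++ [mkPkt t (List.take 3 body)]), hrec [mkPkt t (List.take 3 body)]]
      simp

-- one iteration of A's loop, as a function of the index
def Fpkt (s : List Char) (b : Int) (i : Int) : List Int :=
  mkPkt (b + PySem.Int.floordiv i 3)
    (padFF ((PySem.List.slice s (some i) (some (i + 3))).map (fun c => (c.toNat : Int))))

-- A's result in closed form: one packet per loop index plus the conditional tail packet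
theorem A_closed (b : Int) (s : String) : build_chunked_commands b s =
    (PySem.List.pyRange 0 (s.toList.length : Int) 3).map (Fpkt s.toList b) ++
      (if s.toList.length % 3 = 0 then
        [mkPkt (b + PySem.Int.floordiv (s.toList.length : Int) 3) [0xFF, 0xFF, 0xFF]] else []) := by
  unfold build_chunked_commands
  simp only [PySem.Str.len_eq]
  rw [show (fun (packets : List (List Int)) (i : Int) =>
        let chunk := (PySem.List.slice s.toList (some i) (some (i + 3))).map
          (fun c => (c.toNat : Int))
        let chunk := padFF chunk
        let type_ := b + PySem.Int.floordiv i 3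
        let pkt := [0x7F, 0x79, type_] ++ chunk
        let checksum := PySem.Int.band pkt.sum 0xFF
        packets ++ [pkt ++ [checksum, 0x7E]])
      = fun (packets : List (List Int)) (i : Int) => packets ++ [Fpkt s.toList b i] from by
    funext packets i
    simp only [Fpkt, mkPkt]]
  rw [PySem.List.foldl_append_singleton_eq_map (Fpkt s.toList b) _ [], List.nil_append]
  have hm : (PySem.Int.mod ((s.toList.length : Nat) : Int) 3 = 0) ↔ (s.toList.length % 3 = 0) := by
    rw [show ((3:Int)) = ((3:Nat):Int) from rfl, PySem.Int.mod_natCast]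
    exact_mod_cast Iff.rfl
  split_ifs with h1 h2 h2
  · simp [mkPkt]
  · exact absurd (hm.mp h1) h2
  · exact absurd (hm.mpr h2) h1
  · simp

-- range(0, n, 3) for n ≥ 3 peels off index 0 and shifts the rest by 3
theorem pyRange3_cons (n : Nat) (h : 3 ≤ n) :
    PySem.List.pyRange 0 (n : Int) 3 =
      0 :: (PySem.List.pyRange 0 ((n - 3 : Nat) : Int) 3).map (· + 3) := by
  rw [PySem.List.pyRange_of_pos 0 (n : Int) (by norm_num),
      PySem.List.pyRange_of_pos 0 ((n - 3 : Nat) : Int) (by norm_num)]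
  have h1 : (0 : Int) < (n : Int) := by exact_mod_cast (by omega : 0 < n)
  rw [if_pos h1]
  have e1 : (((n : Int) - 0 + 3 - 1) / 3).toNat = (n - 1) / 3 + 1 := by omega
  have e2 : (if (0 : Int) < ((n - 3 : Nat) : Int)
      then ((((n - 3 : Nat) : Int) - 0 + 3 - 1) / 3).toNat else 0) = (n - 1) / 3 := by
    split_ifs with hh
    · omega
    · omega
  rw [e1, e2, List.range_succ_eq_map]
  simp only [List.map_cons, List.map_map, Nat.cast_zero]
  congr 1

-- shifting A's loop index by 3 is A's loop on the 3-dropped string with type base + 1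
theorem Fpkt_shift (s : List Char) (b : Int) (i : Int) (hi : 0 ≤ i) :
    Fpkt s b (i + 3) = Fpkt (s.drop 3) (b + 1) i := by
  obtain ⟨m, rfl⟩ := Int.eq_ofNat_of_zero_le hi
  unfold Fpkt
  have hdiv : PySem.Int.floordiv ((m : Int) + 3) 3 = PySem.Int.floordiv (m : Int) 3 + 1 := by
    rw [PySem.Int.floordiv_eq_ediv_of_pos (by norm_num : (0:Int) < 3),
        PySem.Int.floordiv_eq_ediv_of_pos (by norm_num : (0:Int) < 3)]
    omega
  have hslice : PySem.List.slice s (some ((m : Int) + 3)) (some ((m : Int) + 3 + 3)) =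
      PySem.List.slice (s.drop 3) (some (m : Int)) (some ((m : Int) + 3)) := by
    have l1 := PySem.List.slice_natCast_add (xs := s) (j := m + 3) (n := 3)
    have l2 := PySem.List.slice_natCast_add (xs := s.drop 3) (j := m) (n := 3)
    push_cast at l1 l2
    rw [l1, l2, List.drop_drop, Nat.add_comm 3 m]
  rw [hdiv, hslice]
  have harith : b + (PySem.Int.floordiv (m : Int) 3 + 1) = b + 1 + PySem.Int.floordiv (m : Int) 3 := by
    ring
  rw [harith]

-- the induction: A's closed form = B's chunk-consuming loop
theorem main_ind : ∀ (m : Nat) (s : List Char), s.length = m → ∀ (b : Int),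
    (PySem.List.pyRange 0 (s.length : Int) 3).map (Fpkt s b) ++
      (if s.length % 3 = 0 then
        [mkPkt (b + PySem.Int.floordiv (s.length : Int) 3) [0xFF, 0xFF, 0xFF]] else []) =
    chunkLoop [] b (s.map (fun c => (c.toNat : Int)) ++
      List.replicate (3 - s.length % 3) 0xFF) := by
  intro m
  induction m using Nat.strong_induction_on with
  | _ m ih =>
    intro s hlen b
    by_cases h3 : 3 ≤ s.length
    · -- at least one full chunk: peel it off and use the induction hypothesis
      have hfd0 : PySem.Int.floordiv 0 3 = 0 := by decide
      have hhead : Fpkt s b 0 = mkPkt b ((s.take 3).map (fun c => (c.toNat : Int))) := by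
        unfold Fpkt
        rw [hfd0, add_zero]
        have hsl : PySem.List.slice s (some 0) (some (0 + 3)) = s.take 3 := by
          norm_num
          rw [PySem.List.slice_to s (by norm_num)]
          rfl
        rw [hsl, padFF_eq]
        have : ((s.take 3).map (fun c => (c.toNat : Int))).length = 3 := by
          simp [hlen]; omega
        rw [this]
        simp
      have htail : (PySem.List.pyRange 0 ((s.length - 3 : Nat) : Int) 3).map
            (fun i => Fpkt s b (i + 3))
          = (PySem.List.pyRange 0 ((s.length - 3 : Nat) : Int) 3).map
            (Fpkt (s.drop 3) (b + 1)) := by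
        apply List.map_congr_left
        intro i hi
        have hi0 : 0 ≤ i := by
          rw [PySem.List.pyRange_of_pos 0 _ (by norm_num : (0:Int) < 3)] at hi
          obtain ⟨k, _, rfl⟩ := List.mem_map.mp hi
          positivity
        exact Fpkt_shift s b i hi0
      have hsplit : s.map (fun c => (c.toNat : Int)) ++ List.replicate (3 - s.length % 3) 0xFF
          = (s.take 3).map (fun c => (c.toNat : Int)) ++
            ((s.drop 3).map (fun c => (c.toNat : Int)) ++
              List.replicate (3 - (s.drop 3).length % 3) 0xFF) := by
        have hcnt2 : (3 - s.length % 3) = (3 - (List.drop 3 s).length % 3) := by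
          simp
          omega
        conv_lhs => rw [← List.take_append_drop 3 s]
        rw [List.map_append, List.append_assoc]
        simp only [List.take_append_drop]
        rw [hcnt2]
      rw [hsplit, chunkLoop_eq]
      rw [if_neg (show ¬ ((s.take 3).map (fun c => (c.toNat : Int)) ++
          ((s.drop 3).map (fun c => (c.toNat : Int)) ++
            List.replicate (3 - (s.drop 3).length % 3) 0xFF) = []) from by
        intro hc
        have hlc := congrArg List.length hc
        simp at hlc
        omega)]
      rw [List.take_left' (by simp; omega), List.drop_left' (by simp; omega)]
      rw [chunkLoop_acc _ _ rfl, List.nil_append]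
      have hIH := ih ((s.drop 3).length) (by simp; omega) (s.drop 3) rfl (b + 1)
      rw [← hIH]
      rw [pyRange3_cons s.length h3, List.map_cons, List.map_map]
      have hcomp : (Fpkt s b ∘ (· + 3)) = fun i => Fpkt s b (i + 3) := rfl
      rw [hcomp, htail, hhead]
      have hdlen : (s.drop 3).length = s.length - 3 := by simp
      rw [hdlen]
      have hmod : s.length % 3 = (s.length - 3) % 3 := by omega
      rw [← hmod]
      by_cases hm0 : s.length % 3 = 0
      · rw [if_pos hm0, if_pos hm0]
        have hty : b + PySem.Int.floordiv ((s.length : Nat) : Int) 3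
            = b + 1 + PySem.Int.floordiv ((s.length - 3 : Nat) : Int) 3 := by
          rw [PySem.Int.floordiv_eq_ediv_of_pos (by norm_num : (0:Int) < 3),
              PySem.Int.floordiv_eq_ediv_of_pos (by norm_num : (0:Int) < 3)]
          have : ((s.length - 3 : Nat) : Int) = (s.length : Int) - 3 := by omega
          rw [this]
          omega
        rw [hty]
        simp
      · rw [if_neg hm0, if_neg hm0]
        simp
    · -- fewer than 3 characters: a single packet on both sides
      have hfd0 : PySem.Int.floordiv 0 3 = 0 := by decide
      by_cases h0 : s = []
      · subst h0
        simp only [List.map_nil, List.nil_append, List.length_nil, Nat.zero_mod, Nat.cast_zero]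
        rw [show PySem.List.pyRange 0 (0 : Int) 3 = [] from by decide]
        rw [if_pos trivial]
        rw [chunkLoop_eq, if_neg (by decide), chunkLoop_eq, if_pos (by decide)]
        simp only [hfd0, add_zero, List.nil_append, List.map_nil]
        rfl
      · have hpos : 0 < s.length := List.length_pos_of_ne_nil h0
        have hlt : s.length < 3 := by omega
        have hr : PySem.List.pyRange 0 ((s.length : Nat) : Int) 3 = [0] := by
          rw [PySem.List.pyRange_of_pos 0 _ (by norm_num : (0:Int) < 3)]
          have : (if (0:Int) < ((s.length : Nat) : Int)
              then ((((s.length : Nat) : Int) - 0 + 3 - 1) / 3).toNat else 0) = 1 := by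
            split_ifs with hh
            · omega
            · omega
          rw [this]
          simp
        rw [hr]
        have hmod : s.length % 3 = s.length := Nat.mod_eq_of_lt hlt
        rw [if_neg (by omega)]
        have hbody3 : (List.map (fun c : Char => (c.toNat : Int)) s ++
            List.replicate (3 - s.length % 3) 0xFF).length = 3 := by
          simp [hmod]; omega
        rw [chunkLoop_eq, if_neg (by intro hh; rw [hh] at hbody3; simp at hbody3)]
        rw [List.take_of_length_le (by omega), List.drop_eq_nil_of_le (by omega)]
        rw [chunkLoop_eq, if_pos rfl]
        simp only [List.map_cons, List.map_nil, List.append_nil, List.nil_append]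
        unfold Fpkt
        rw [hfd0, add_zero]
        have hsl : PySem.List.slice s (some 0) (some (0 + 3)) = s.take 3 := by
          norm_num
          rw [PySem.List.slice_to s (by norm_num)]
          rfl
        rw [hsl, List.take_of_length_le (by omega), padFF_eq]
        rw [show (List.map (fun c : Char => (c.toNat : Int)) s).length = s.length from by simp, hmod]

-- shifting the enumerate start by one shifts the packet type base by one
theorem enum_shift (cs : List (List Int)) : ∀ (j b : Int),
    (PySem.List.enumerate cs (j + 1)).map (fun kc => mkPkt (b + kc.1) kc.2)
    = (PySem.List.enumerate cs j).map (fun kc => mkPkt (b + 1 + kc.1) kc.2) := by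
  induction cs with
  | nil => intro j b; simp [PySem.List.enumerate_nil]
  | cons c cs ih =>
    intro j b
    rw [PySem.List.enumerate_cons, PySem.List.enumerate_cons, List.map_cons, List.map_cons,
        ih (j + 1) b]
    have : b + (j + 1) = b + 1 + j := by ring
    rw [this]

-- the grouping pass produces exactly the consecutive triples (padded length is divisible by 3)
theorem gfold : ∀ (m : Nat) (body : List Int), body.length = m → 3 ∣ m →
    ∀ (chunks0 : List (List Int)),
    body.foldl gstep (chunks0, []) = (chunks0 ++ chunkList body, []) := by
  intro m
  induction m using Nat.strong_induction_on with
  | _ m ih =>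
    intro body hlen hdvd chunks0
    rcases body with _ | ⟨a, _ | ⟨b, _ | ⟨c, r⟩⟩⟩
    · rw [chunkList]
      simp
    · simp at hlen; omega
    · simp at hlen; omega
    · have hr : r.length = m - 3 := by simp at hlen; omega
      have hstep : [a, b, c].foldl gstep (chunks0, []) = (chunks0 ++ [[a, b, c]], []) := by
        simp [gstep]
      have : (a :: b :: c :: r).foldl gstep (chunks0, []) =
          r.foldl gstep (chunks0 ++ [[a, b, c]], []) := by
        rw [show a :: b :: c :: r = [a, b, c] ++ r from rfl, List.foldl_append, hstep]
      have hmge : 3 ≤ m := by subst hlen; simp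
      rw [this, ih (m - 3) (by omega) r hr (by omega) (chunks0 ++ [[a, b, c]])]
      conv_rhs => rw [chunkList]
      simp

-- framing the enumerated triples is exactly the three-at-a-time loop
theorem chunk_map : ∀ (m : Nat) (body : List Int), body.length = m → ∀ (b : Int),
    (PySem.List.enumerate (chunkList body) 0).map (fun kc => mkPkt (b + kc.1) kc.2)
    = chunkLoop [] b body := by
  intro m
  induction m using Nat.strong_induction_on with
  | _ m ih =>
    intro body hlen b
    by_cases h : body = []
    · subst h
      rw [chunkList, chunkLoop]
      simp [PySem.List.enumerate_nil]
    · rw [chunkList, dif_neg h, PySem.List.enumerate_cons, List.map_cons]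
      rw [show (0 : Int) + 1 = 0 + 1 from rfl, enum_shift]
      have hd : (body.drop 3).length < m := by
        subst hlen
        cases body with
        | nil => exact absurd rfl h
        | cons a l => simp
      have : b + 1 + (0 : Int) = b + 1 := by ring
      rw [ih _ hd (body.drop 3) rfl (b + 1)]
      rw [chunkLoop_eq [] b body, if_neg h,
          chunkLoop_acc _ (body.drop 3) rfl ([] ++ [mkPkt b (List.take 3 body)]) (b + 1)]
      simp

theorem build_chunked_commands_eq (base_type : Int) (data_str : String) :
    build_chunked_commands base_type data_str = build_chunked_commands_alt base_type data_str := by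
  unfold build_chunked_commands_alt
  dsimp only []
  rw [A_closed]
  have hcnt : (3 - PySem.Int.mod (PySem.Str.len data_str) 3).toNat =
      3 - data_str.toList.length % 3 := by
    rw [PySem.Str.len_eq]
    rw [show ((3:Int)) = ((3:Nat):Int) from rfl, PySem.Int.mod_natCast]
    omega
  rw [hcnt]
  have hdvd : 3 ∣ (data_str.toList.map (fun c => (c.toNat : Int)) ++
      List.replicate (3 - data_str.toList.length % 3) (0xFF : Int)).length := by
    simp
    omega
  rw [gfold _ _ rfl hdvd []]
  rw [show (fun (packets : List (List Int)) (kc : Int × List Int) =>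
        let pkt := [0x7F, 0x79, base_type + kc.1] ++ kc.2
        packets ++ [pkt ++ [PySem.Int.band pkt.sum 0xFF, 0x7E]])
      = fun (packets : List (List Int)) (kc : Int × List Int) =>
        packets ++ [mkPkt (base_type + kc.1) kc.2] from by
    funext packets kc
    simp only [mkPkt]]
  rw [PySem.List.foldl_append_singleton_eq_map
        (fun kc : Int × List Int => mkPkt (base_type + kc.1) kc.2) _ [], List.nil_append,
      List.nil_append]
  rw [chunk_map _ _ rfl base_type]
  exact main_ind _ data_str.toList rfl base_type

-- ===== VERDICT (by name: the statement is the Claim_ definition above) =====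
theorem build_chunked_commands_spec : Claim_equal_build_chunked_commands := by
  intro base_type data_str _
  exact build_chunked_commands_eq base_type data_str
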